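-- pv_equiv track=rewrite | github.com/pallamidessi/OW-tech-test | usage.py | compute_cost_per_words
-- ===== SOURCE A (Python) =====
-- from typing import List
--
-- def compute_cost_per_words(words: List[str]):
--     total_cost = 0
--     for word in words:
--         word_length = len(word)
--         match word_length:
--             case length if length <= 3:
--                 total_cost += 10
--             case length if length <= 7:
--                 total_cost += 20
--             case _:
--                 total_cost += 30
--
--     return total_cost
-- ===== SOURCE B (Python) =====
-- def compute_cost_per_words(words):
--     # Branch-free arithmetic reformulation: each word costs a base 10, plus a
--     # 10 surcharge if its length exceeds 3, plus another 10 if it exceeds 7.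
--     # So total = 10 * (n + #{len>3} + #{len>7}), computed by indicator sums.
--     lens = [len(w) for w in words]
--     return 10 * (len(lens) + sum(L > 3 for L in lens) + sum(L > 7 for L in lens))
-- ===== Notes on version B (the rewrite author's own statement) =====
-- stated objective: alternative
-- what changed: B removes A's three-way match/case entirely: it uses the identity cost(L) = 10 + 10*[L>3] + 10*[L>7] and returns 10*(n + count(len>3) + count(len>7)) via staged indicator-sum passes over the length list.
import Mathlib
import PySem

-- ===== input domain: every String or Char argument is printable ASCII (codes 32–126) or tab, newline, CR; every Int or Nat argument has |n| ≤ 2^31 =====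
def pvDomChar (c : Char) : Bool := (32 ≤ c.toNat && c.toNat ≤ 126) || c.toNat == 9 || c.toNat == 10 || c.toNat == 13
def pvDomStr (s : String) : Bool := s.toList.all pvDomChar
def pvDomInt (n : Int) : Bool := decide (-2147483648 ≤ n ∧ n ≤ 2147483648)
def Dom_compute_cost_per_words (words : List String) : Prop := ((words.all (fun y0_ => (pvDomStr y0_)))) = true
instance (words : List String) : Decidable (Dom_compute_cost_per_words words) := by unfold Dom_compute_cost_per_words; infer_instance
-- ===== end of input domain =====

-- B replaces A's three-way match/case by the arithmetic identity cost(L)=10+10*[L>3]+10*[L>7], returning 10*(n + count(len>3) + count(len>7)) (alternative decomposition, same cost).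


-- ===== PORT A =====
def compute_cost_per_words (words : List String) : Int :=
  words.foldl (fun total_cost word =>
    let word_length := PySem.Str.len word
    if word_length ≤ 3 then total_cost + 10
    else if word_length ≤ 7 then total_cost + 20
    else total_cost + 30) 0

-- ===== PORT B =====
def compute_cost_per_words_alt (words : List String) : Int :=
  let lens := words.map PySem.Str.len
  10 * ((lens.length : Int)
        + (lens.countP (fun L => 3 < L) : Int)
        + (lens.countP (fun L => 7 < L) : Int))

-- ===== PRECONDITION & SPEC =====
def Spec_compute_cost_per_words (words : List String) (out : Int) : Prop := out = compute_cost_per_words_alt words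
instance (words : List String) (out : Int) : Decidable (Spec_compute_cost_per_words words out) := by unfold Spec_compute_cost_per_words; infer_instance

-- ===== CLAIM (what is proved, stated in full; the proofs are below) =====
def Claim_equal_compute_cost_per_words : Prop := ∀ (words : List String), Dom_compute_cost_per_words words → Spec_compute_cost_per_words words (compute_cost_per_words words)

-- ===== LEMMAS AND PROOFS =====
theorem pvFold_shift (words : List String) (t : Int) :
    words.foldl (fun total_cost word =>
      let word_length := PySem.Str.len word
      if word_length ≤ 3 then total_cost + 10
      else if word_length ≤ 7 then total_cost + 20
      else total_cost + 30) t
    = t + compute_cost_per_words_alt words := by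
  induction words generalizing t with
  | nil => simp [compute_cost_per_words_alt]
  | cons w ws ih =>
    simp only [List.foldl_cons]
    rw [ih]
    simp only [compute_cost_per_words_alt, List.map_cons, List.length_cons,
      List.countP_cons]
    split_ifs with h1 h2 <;>
      simp_all [decide_eq_true_eq] <;> omega

-- ===== VERDICT (by name: the statement is the Claim_ definition above) =====
theorem compute_cost_per_words_spec : Claim_equal_compute_cost_per_words := by
  intro words _
  unfold Spec_compute_cost_per_words compute_cost_per_words
  simpa using pvFold_shift words 0
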